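-- pv_equiv track=rewrite | github.com/Gazhole/AdventOfCode2019 | day5.py | parse_opcode
-- ===== SOURCE A (Python) =====
-- def parse_opcode(opcode):
--     opcode = str(opcode)
--
--     for i in range(5 - len(opcode)):
--         opcode = "0" + opcode
--
--     e = int(opcode[-1])
--     d = int(opcode[-2])
--     c = int(opcode[-3])
--     b = int(opcode[-4])
--     a = int(opcode[-5])
--
--     opcode = int(str(d) + str(e))
--     param_1_mode = c
--     param_2_mode = b
--     param_3_mode = a
--
--     return opcode, param_1_mode, param_2_mode, param_3_mode
-- ===== SOURCE B (Python) =====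
-- def parse_opcode(opcode):
--     opcode = int(opcode)
--     return (opcode % 100,
--             opcode // 100 % 10,
--             opcode // 1000 % 10,
--             opcode // 10000 % 10)
-- ===== Notes on version B (the rewrite author's own statement) =====
-- stated objective: simpler
-- what changed: Replaces string conversion, zero-padding loop and per-character slicing/re-parsing with four closed-form modular-arithmetic expressions on the integer itself.
-- outside the precondition, e.g. on parse_opcode(-12345): A returns (45, 3, 2, 1), B returns (55, 6, 7, 8); on parse_opcode(-10000): A returns (0, 0, 0, 1), B returns (0, 0, 0, 9)
import Mathlib
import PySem

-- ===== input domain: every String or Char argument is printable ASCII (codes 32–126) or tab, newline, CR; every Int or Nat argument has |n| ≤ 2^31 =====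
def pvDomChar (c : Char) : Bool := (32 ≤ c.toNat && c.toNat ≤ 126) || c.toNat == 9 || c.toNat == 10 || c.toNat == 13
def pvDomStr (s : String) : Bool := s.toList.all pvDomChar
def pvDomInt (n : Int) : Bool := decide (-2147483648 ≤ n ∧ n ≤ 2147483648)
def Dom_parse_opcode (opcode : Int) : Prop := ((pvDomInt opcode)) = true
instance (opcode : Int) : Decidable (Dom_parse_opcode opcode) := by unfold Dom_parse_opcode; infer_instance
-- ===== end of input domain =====

-- B replaces A's string padding/slicing with closed-form modular arithmetic (objective: simpler).

-- ===== PORT A =====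
-- literal transliteration of A over List Char (str(n) = PySem.Int.toChars;
-- int(c) where Python would raise ValueError yields none, port takes getD 0 there — excluded by Pre_)
def parse_opcode (opcode : Int) : Int × Int × Int × Int :=
  let s0 := PySem.Int.toChars opcode
  -- for i in range(5 - len(opcode)): opcode = "0" + opcode
  let s := (PySem.List.pyRange 0 (5 - (s0.length : Int)) 1).foldl (fun s _ => '0' :: s) s0
  let e := ((PySem.List.pyGet? s (-1)).bind (fun c => PySem.Int.ofChars? [c])).getD 0
  let d := ((PySem.List.pyGet? s (-2)).bind (fun c => PySem.Int.ofChars? [c])).getD 0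
  let c := ((PySem.List.pyGet? s (-3)).bind (fun c => PySem.Int.ofChars? [c])).getD 0
  let b := ((PySem.List.pyGet? s (-4)).bind (fun c => PySem.Int.ofChars? [c])).getD 0
  let a := ((PySem.List.pyGet? s (-5)).bind (fun c => PySem.Int.ofChars? [c])).getD 0
  let opc := (PySem.Int.ofChars? (PySem.Int.toChars d ++ PySem.Int.toChars e)).getD 0
  (opc, c, b, a)

-- ===== PORT B =====
def parse_opcode_alt (opcode : Int) : Int × Int × Int × Int :=
  (PySem.Int.mod opcode 100,
   PySem.Int.mod (PySem.Int.floordiv opcode 100) 10,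
   PySem.Int.mod (PySem.Int.floordiv opcode 1000) 10,
   PySem.Int.mod (PySem.Int.floordiv opcode 10000) 10)

-- ===== PRECONDITION & SPEC =====
-- Pre_ excludes all negative opcodes: on -9999..-1 A raises ValueError (int() hits the '-' sign),
-- and on opcode ≤ -10000 A silently parses the digits of the absolute value ignoring the sign —
-- a defensible-corner artefact nobody would specify — while B returns Python's floor-mod fields.
def Pre_parse_opcode (opcode : Int) : Prop := 0 ≤ opcode
instance (opcode : Int) : Decidable (Pre_parse_opcode opcode) := by unfold Pre_parse_opcode; infer_instance
def pvWitness_parse_opcode : Int := 1002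

def Spec_parse_opcode (opcode : Int) (out : Int × Int × Int × Int) : Prop := out = parse_opcode_alt opcode
instance (opcode : Int) (out : Int × Int × Int × Int) : Decidable (Spec_parse_opcode opcode out) := by unfold Spec_parse_opcode; infer_instance

-- ===== CLAIM (what is proved, stated in full; the proofs are below) =====
def Claim_equal_parse_opcode : Prop := ∀ (opcode : Int), Dom_parse_opcode opcode → Pre_parse_opcode opcode → Spec_parse_opcode opcode (parse_opcode opcode)

-- ===== LEMMAS AND PROOFS =====

-- `Nat.toDigits 10` characterised through `Nat.digits 10`
theorem pv_toDigitsCore_eq : ∀ (f m : Nat) (l : List Char), m < f →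
    Nat.toDigitsCore 10 f m l =
      ((Nat.digits 10 m).map Nat.digitChar).reverse ++ (if m = 0 then ['0'] else []) ++ l := by
  intro f
  induction f with
  | zero => intro m l h; omega
  | succ f ih =>
    intro m l h
    rw [Nat.toDigitsCore]
    by_cases h0 : m = 0
    · subst h0; simp; decide
    by_cases h10 : m / 10 = 0
    · have hd : Nat.digits 10 m = [m % 10] := by
        rw [Nat.digits_def' (by norm_num) (Nat.pos_of_ne_zero h0), h10]; simp
      simp [h10, hd, h0]
    · have hrec : Nat.digits 10 m = m % 10 :: Nat.digits 10 (m / 10) := by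
        exact Nat.digits_def' (by norm_num) (Nat.pos_of_ne_zero h0)
      have hlt : m / 10 < f := by omega
      rw [if_neg h10, ih (m / 10) _ hlt, hrec]
      simp [h10, h0]

theorem pv_toDigits_eq (m : Nat) :
    Nat.toDigits 10 m =
      ((Nat.digits 10 m).map Nat.digitChar).reverse ++ (if m = 0 then ['0'] else []) := by
  have := pv_toDigitsCore_eq (m + 1) m [] (by omega)
  simpa [Nat.toDigits] using this

theorem pv_digits_getD : ∀ (k m : Nat),
    ((Nat.digits 10 m).map Nat.digitChar).getD k '0' = Nat.digitChar (m / 10 ^ k % 10) := by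
  intro k
  induction k with
  | zero =>
    intro m
    by_cases h0 : m = 0
    · subst h0; simp; decide
    · rw [Nat.digits_def' (by norm_num) (Nat.pos_of_ne_zero h0)]; simp
  | succ k ih =>
    intro m
    by_cases h0 : m = 0
    · subst h0; simp; decide
    · rw [Nat.digits_def' (by norm_num) (Nat.pos_of_ne_zero h0)]
      have : m / 10 ^ (k + 1) = m / 10 / 10 ^ k := by
        rw [Nat.div_div_eq_div_mul, pow_succ, Nat.mul_comm]
      simp only [List.map_cons, List.getD_cons_succ, ih (m / 10), this]

-- digit k from the right of str(m)
theorem pv_rev_toDigits_getD (m k : Nat) :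
    (Nat.toDigits 10 m).reverse.getD k '0' = Nat.digitChar (m / 10 ^ k % 10) := by
  rw [pv_toDigits_eq]
  by_cases h0 : m = 0
  · subst h0
    cases k <;> simp <;> decide
  · rw [if_neg h0]
    simpa using pv_digits_getD k m

theorem pv_getD_append_replicate (X : List Char) (j : Nat) : ∀ (k : Nat),
    (X ++ List.replicate j '0').getD k '0' = X.getD k '0' := by
  induction X with
  | nil =>
    intro k
    simp [List.getD, List.getElem?_replicate]
    split <;> simp
  | cons x xs ih =>
    intro k
    cases k with
    | zero => simp
    | succ k => simpa using ih k

theorem pv_foldl_prepend : ∀ (r : List Int) (s : List Char),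
    r.foldl (fun s _ => '0' :: s) s = List.replicate r.length '0' ++ s := by
  intro r
  induction r with
  | nil => intro s; simp
  | cons x xs ih =>
    intro s
    simp only [List.foldl_cons, ih ('0' :: s), List.length_cons]
    rw [List.replicate_succ']
    simp

theorem pv_pyRange_len (n : Int) : (PySem.List.pyRange 0 n 1).length = n.toNat := by
  simp only [PySem.List.pyRange]
  split
  · omega
  · split
    · simp; omega
    · simp; omega

theorem pv_toDigits_ne_nil (m : Nat) : Nat.toDigits 10 m ≠ [] := by
  rw [pv_toDigits_eq]
  by_cases h0 : m = 0
  · simp [h0]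
  · simp [h0, Nat.digits_ne_nil_iff_ne_zero.mpr h0]

theorem pv_pyGet?_neg (xs : List Char) (i : Int) (k : Nat) (hik : i = -((k : Int) + 1))
    (hk : k < xs.length) : PySem.List.pyGet? xs i = some (xs.reverse.getD k '0') := by
  subst hik
  have h1 : xs.length - (k + 1) < xs.length := by omega
  have h2 : k < xs.reverse.length := by simpa using hk
  rw [List.getD_eq_getElem _ _ h2, List.getElem_reverse]
  simp only [PySem.List.pyGet?, PySem.List.pyIdx?]
  rw [if_neg (by omega), if_pos (by omega)]
  simp only [neg_neg]
  have h3 : ((k : Int) + 1).toNat = k + 1 := by omega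
  rw [h3]
  simp only [Option.bind_some]
  rw [List.getElem?_eq_getElem h1]
  simp only [Option.some.injEq]
  congr 1
  omega

theorem pv_ofChars_one (d : Nat) (hd : d < 10) :
    PySem.Int.ofChars? [Nat.digitChar d] = some (d : Int) := by
  interval_cases d <;> decide

theorem pv_ofChars_two (d e : Nat) (hd : d < 10) (he : e < 10) :
    PySem.Int.ofChars? (PySem.Int.toChars (d : Int) ++ PySem.Int.toChars (e : Int)) =
      some ((10 * d + e : Nat) : Int) := by
  interval_cases d <;> interval_cases e <;> decide

-- the k-th digit from the right of the padded string, as arithmetic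
theorem pv_padded_digit (m j k : Nat) (i : Int) (hik : i = -((k : Int) + 1))
    (hk : k < j + (Nat.toDigits 10 m).length) :
    PySem.List.pyGet? (List.replicate j '0' ++ Nat.toDigits 10 m) i =
      some (Nat.digitChar (m / 10 ^ k % 10)) := by
  rw [pv_pyGet?_neg _ _ k hik (by simp; omega)]
  rw [List.reverse_append, List.reverse_replicate]
  rw [pv_getD_append_replicate, pv_rev_toDigits_getD]

theorem pv_ofChars_one' (x : Nat) :
    PySem.Int.ofChars? [Nat.digitChar (x % 10)] = some ((x % 10 : Nat) : Int) :=
  pv_ofChars_one _ (Nat.mod_lt _ (by norm_num))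

theorem pv_ofChars_two' (x y : Nat) :
    PySem.Int.ofChars? (PySem.Int.toChars ((x % 10 : Nat) : Int) ++ PySem.Int.toChars ((y % 10 : Nat) : Int)) =
      some ((10 * (x % 10) + y % 10 : Nat) : Int) :=
  pv_ofChars_two _ _ (Nat.mod_lt _ (by norm_num)) (Nat.mod_lt _ (by norm_num))

-- ===== VERDICT (by name: the statement is the Claim_ definition above) =====
theorem parse_opcode_spec : Claim_equal_parse_opcode := by
  intro opcode _ hpre
  obtain ⟨m, rfl⟩ := Int.eq_ofNat_of_zero_le hpre
  unfold Spec_parse_opcode parse_opcode parse_opcode_alt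
  have hchars : PySem.Int.toChars (m : Int) = Nat.toDigits 10 m := by
    unfold PySem.Int.toChars
    rw [if_neg (by omega)]
    simp
  have hL1 : 1 ≤ (Nat.toDigits 10 m).length := by
    have := pv_toDigits_ne_nil m
    cases h : Nat.toDigits 10 m <;> simp_all
  simp only []
  simp only [hchars, pv_foldl_prepend, pv_pyRange_len]
  have hlen : ∀ k : Nat, k < 5 →
      k < ((5 : Int) - ((Nat.toDigits 10 m).length : Int)).toNat + (Nat.toDigits 10 m).length := by
    intro k hk; omega
  have g0 := pv_padded_digit m _ 0 (-1) (by norm_num) (hlen 0 (by norm_num))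
  have g1 := pv_padded_digit m _ 1 (-2) (by norm_num) (hlen 1 (by norm_num))
  have g2 := pv_padded_digit m _ 2 (-3) (by norm_num) (hlen 2 (by norm_num))
  have g3 := pv_padded_digit m _ 3 (-4) (by norm_num) (hlen 3 (by norm_num))
  have g4 := pv_padded_digit m _ 4 (-5) (by norm_num) (hlen 4 (by norm_num))
  simp only [g0, g1, g2, g3, g4, Option.bind_some, Option.getD_some,
    pow_zero, Nat.div_one, pv_ofChars_one', pv_ofChars_two']
  simp only [PySem.Int.mod, PySem.Int.floordiv, Int.fmod_eq_emod, Int.fdiv_eq_ediv,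
    Prod.mk.injEq]
  norm_num
  omega
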